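-- pv_equiv track=rewrite | github.com/pol9127/optomechanics_reloaded | experiment/device/red_pitaya/boltzmann_redpitaya.py | data_parser
-- ===== SOURCE A (Python) =====
-- def data_parser(data):
--     chunks = data.split(' ')
--     outputs = []
--     for chunk in chunks:
--         try:
--             outputs.append(int(chunk))
--         except:
--             pass
--     channel1, channel2 = outputs[::2], outputs[1::2]
--     return channel1, channel2
-- ===== SOURCE B (Python) =====
-- def data_parser(data):
--     channel1, channel2 = [], []
--     use_second = False
--     for chunk in data.split(' '):
--         try:
--             value = int(chunk)
--         except ValueError:
--             continue
--         if use_second: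
--             channel2.append(value)
--         else:
--             channel1.append(value)
--         use_second = not use_second
--     return channel1, channel2
-- ===== Notes on version B (the rewrite author's own statement) =====
-- stated objective: simpler
-- what changed: Replaces A's collect-into-one-list-then-slice-by-step-2 with a single pass that distributes each successfully parsed token directly into channel1 or channel2 via a toggle that flips only on successful parses.
import Mathlib
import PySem

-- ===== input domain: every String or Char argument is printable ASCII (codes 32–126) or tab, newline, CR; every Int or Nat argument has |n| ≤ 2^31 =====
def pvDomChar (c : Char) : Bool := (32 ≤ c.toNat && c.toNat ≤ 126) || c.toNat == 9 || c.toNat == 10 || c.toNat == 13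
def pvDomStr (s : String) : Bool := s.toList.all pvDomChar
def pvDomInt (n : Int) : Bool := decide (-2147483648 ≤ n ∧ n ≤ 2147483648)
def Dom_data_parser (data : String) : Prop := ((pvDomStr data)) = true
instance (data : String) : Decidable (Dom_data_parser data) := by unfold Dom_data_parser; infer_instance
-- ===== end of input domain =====

-- B replaces A's collect-then-slice-by-step-2 with a single toggle-distributing pass (objective: simpler).


-- ===== PORT A =====
def data_parser (data : String) : List Int × List Int :=
  let chunks := (PySem.Str.split? data " ").getD []
  let outputs := chunks.foldl (fun acc chunk =>
    match PySem.Int.ofStr? chunk with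
    | some n => acc ++ [n]
    | none => acc) []
  let channel1 := (PySem.List.slice? outputs none none 2).getD []
  let channel2 := (PySem.List.slice? outputs (some 1) none 2).getD []
  (channel1, channel2)

-- ===== PORT B =====
def dpGo : List String → List Int → List Int → Bool → List Int × List Int
  | [], c1, c2, _ => (c1, c2)
  | t :: ts, c1, c2, useSecond =>
    match PySem.Int.ofStr? t with
    | none => dpGo ts c1 c2 useSecond
    | some v =>
      if useSecond then dpGo ts c1 (c2 ++ [v]) (!useSecond)
      else dpGo ts (c1 ++ [v]) c2 (!useSecond)

def data_parser_alt (data : String) : List Int × List Int :=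
  dpGo ((PySem.Str.split? data " ").getD []) [] [] false

-- ===== PRECONDITION & SPEC =====
def Spec_data_parser (data : String) (out : List Int × List Int) : Prop := out = data_parser_alt data
instance (data : String) (out : List Int × List Int) : Decidable (Spec_data_parser data out) := by unfold Spec_data_parser; infer_instance

-- ===== CLAIM (what is proved, stated in full; the proofs are below) =====
def Claim_equal_data_parser : Prop := ∀ (data : String), Dom_data_parser data → Spec_data_parser data (data_parser data)

-- ===== LEMMAS AND PROOFS =====

-- even-index and odd-index elements of a list
mutual
def pvEvens : List Int → List Int
  | [] => []
  | x :: xs => x :: pvOdds xs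
def pvOdds : List Int → List Int
  | [] => []
  | _ :: xs => pvEvens xs
end

theorem fm_both (xs : List Int) :
    (List.range ((xs.length + 1) / 2)).filterMap (fun k => xs[2 * k]?) = pvEvens xs ∧
    (List.range (xs.length / 2)).filterMap (fun k => xs[2 * k + 1]?) = pvOdds xs := by
  induction xs with
  | nil => simp [pvEvens, pvOdds]
  | cons x xs ih =>
    constructor
    · have hc : (xs.length + 1 + 1) / 2 = xs.length / 2 + 1 := by omega
      simp only [List.length_cons, hc, List.range_succ_eq_map, List.filterMap_cons,
        List.filterMap_map, pvEvens]
      simp only [Nat.mul_zero, List.getElem?_cons_zero, Function.comp_def]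
      rw [show (fun k => (x :: xs)[2 * (k + 1)]?) = (fun k => xs[2 * k + 1]?) by
        funext k; rw [show 2 * (k+1) = (2*k+1)+1 by omega, List.getElem?_cons_succ]]
      rw [ih.2]
    · simp only [List.length_cons, pvOdds]
      rw [← ih.1]
      apply List.filterMap_congr
      intro k _
      rw [show 2*k+1 = (2*k)+1 by omega, List.getElem?_cons_succ]

theorem slice_even (xs : List Int) :
    PySem.List.slice? xs none none 2 = some (pvEvens xs) := by
  rw [← (fm_both xs).1]
  simp only [PySem.List.slice?, PySem.List.sliceIndices]
  norm_num
  have h1 : (if 0 < xs.length then (((xs.length : ℤ) + 2 - 1) / 2).toNat else 0)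
      = (xs.length + 1) / 2 := by
    split_ifs with h <;> omega
  rw [h1]
  apply List.filterMap_congr
  intro k _
  congr 1

theorem slice_odd (xs : List Int) :
    PySem.List.slice? xs (some 1) none 2 = some (pvOdds xs) := by
  rw [← (fm_both xs).2]
  simp only [PySem.List.slice?, PySem.List.sliceIndices]
  norm_num
  have h1 : (if 1 < xs.length then (((xs.length : ℤ) - min 1 (xs.length : ℤ) + 2 - 1) / 2).toNat else 0)
      = xs.length / 2 := by
    split_ifs with h <;> omega
  rw [h1]
  apply List.filterMap_congr
  intro k hk
  simp only [List.mem_range] at hk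
  congr 1
  omega

theorem foldl_collect (chunks : List String) (acc : List Int) :
    chunks.foldl (fun acc chunk =>
      match PySem.Int.ofStr? chunk with
      | some n => acc ++ [n]
      | none => acc) acc = acc ++ chunks.filterMap PySem.Int.ofStr? := by
  induction chunks generalizing acc with
  | nil => simp
  | cons c cs ih =>
    simp only [List.foldl_cons, List.filterMap_cons]
    cases PySem.Int.ofStr? c <;> simp [ih]

theorem dpGo_eq (ts : List String) : ∀ (c1 c2 : List Int),
    dpGo ts c1 c2 false = (c1 ++ pvEvens (ts.filterMap PySem.Int.ofStr?),
                           c2 ++ pvOdds (ts.filterMap PySem.Int.ofStr?)) ∧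
    dpGo ts c1 c2 true = (c1 ++ pvOdds (ts.filterMap PySem.Int.ofStr?),
                          c2 ++ pvEvens (ts.filterMap PySem.Int.ofStr?)) := by
  induction ts with
  | nil => intro c1 c2; simp [dpGo, pvEvens, pvOdds]
  | cons t ts ih =>
    intro c1 c2
    simp only [dpGo, List.filterMap_cons]
    cases h : PySem.Int.ofStr? t with
    | none => exact ih c1 c2
    | some v =>
      constructor
      · simpa [pvEvens, pvOdds] using (ih (c1 ++ [v]) c2).2
      · simpa [pvEvens, pvOdds] using (ih c1 (c2 ++ [v])).1

-- ===== VERDICT (by name: the statement is the Claim_ definition above) =====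
theorem data_parser_spec : Claim_equal_data_parser := by
  intro data _
  unfold Spec_data_parser data_parser data_parser_alt
  simp only [foldl_collect, List.nil_append, slice_even, slice_odd, Option.getD_some]
  exact ((dpGo_eq _ [] []).1).symm
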